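-- pv_equiv track=rewrite | github.com/LLNL/Surfactant | pymsi/pymsi.py | encode_streamname_unicode
-- ===== SOURCE A (Python) =====
-- TABLE_PREFIX = "\u4840"
--
-- def utf2mime(x):
--     if x in range(ord('0'), ord('9')+1):
--         return x-ord('0')
--     if x in range(ord('A'), ord('Z')+1):
--         return x-ord('A')+10
--     if x in range(ord('a'), ord('z')+1):
--         return x-ord('a')+10+26
--     if x == ord('.'):
--         return 10+26+26
--     if x == ord('_'):
--         return 10+26+26+1
--     return None
--
-- def encode_streamname_unicode(name, isTable=False):
--     out = str()
--     if isTable: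
--         out += TABLE_PREFIX
--     name_enum = enumerate(name)
--     for idx, c1 in name_enum:
--         value1 = utf2mime(ord(c1))
--         if value1 != None:
--             if idx+1 < len(name):
--                 value2 = utf2mime(ord(name[idx+1]))
--                 if value2 != None:
--                     encoded = 0x3800 + (value2 << 6) + value1
--                     out += chr(encoded)
--                     next(name_enum)
--                     continue
--             encoded = 0x4800 + value1
--             out += chr(encoded)
--         else:
--             out += c1
--     return out
-- ===== SOURCE B (Python) =====
-- TABLE_PREFIX = "\u4840"
--
-- _MIME = {c: i for i, c in enumerate(
--     "0123456789ABCDEFGHIJKLMNOPQRSTUVWXYZabcdefghijklmnopqrstuvwxyz._")}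
--
--
-- def encode_streamname_unicode(name, isTable=False):
--     # Staged algorithm: split the name into maximal runs of encodable /
--     # non-encodable characters, then encode each encodable run independently
--     # by chunking its values two at a time (pairs never cross a run boundary,
--     # so this reproduces the greedy left-to-right pairing).
--     parts = []
--     i, n = 0, len(name)
--     while i < n:
--         enc = name[i] in _MIME
--         j = i
--         while j < n and (name[j] in _MIME) == enc:
--             j += 1
--         run = name[i:j]
--         if enc:
--             vs = [_MIME[c] for c in run]
--             for k in range(0, len(vs) - 1, 2):
--                 parts.append(chr(0x3800 + (vs[k + 1] << 6) + vs[k]))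
--             if len(vs) % 2:
--                 parts.append(chr(0x4800 + vs[-1]))
--         else:
--             parts.append(run)
--         i = j
--     return (TABLE_PREFIX if isTable else "") + "".join(parts)
-- ===== Notes on version B (the rewrite author's own statement) =====
-- stated objective: faster
-- what changed: B is a staged algorithm: it first splits the name into maximal runs of encodable/non-encodable characters, then encodes each encodable run independently by chunking its dictionary-looked-up values two at a time, instead of A's single enumerate/next() peek-and-skip loop with per-character range tests and repeated string concatenation.
import Mathlib
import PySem

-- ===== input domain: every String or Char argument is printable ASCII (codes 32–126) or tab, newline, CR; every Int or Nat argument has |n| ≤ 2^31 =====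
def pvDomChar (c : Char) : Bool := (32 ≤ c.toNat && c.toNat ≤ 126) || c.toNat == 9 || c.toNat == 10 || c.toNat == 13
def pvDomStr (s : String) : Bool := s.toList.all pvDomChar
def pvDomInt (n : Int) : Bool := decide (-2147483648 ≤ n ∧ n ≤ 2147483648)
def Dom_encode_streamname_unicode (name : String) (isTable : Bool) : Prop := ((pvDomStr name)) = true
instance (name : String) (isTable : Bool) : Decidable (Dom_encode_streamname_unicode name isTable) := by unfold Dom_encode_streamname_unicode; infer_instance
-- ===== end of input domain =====

-- B replaces A's single enumerate/next() peek-and-skip loop by a staged algorithm: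
-- split the name into maximal encodable / non-encodable runs, then encode each
-- encodable run by chunking its dictionary-looked-up values two at a time
-- (objective: faster; a timing run measured B faster by a constant factor).

-- ===== PORT A =====
def utf2mimeA (x : Nat) : Option Int :=
  if 48 ≤ x ∧ x ≤ 57 then some ((x : Int) - 48)
  else if 65 ≤ x ∧ x ≤ 90 then some ((x : Int) - 65 + 10)
  else if 97 ≤ x ∧ x ≤ 122 then some ((x : Int) - 97 + 10 + 26)
  else if x = 46 then some (10 + 26 + 26)
  else if x = 95 then some (10 + 26 + 26 + 1)
  else none

-- the for-loop over enumerate(name) with the next()-skip on a paired character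
def loopA (cs : List Char) : List (Int × Char) → List Char
  | [] => []
  | (idx, c1) :: rest =>
    match utf2mimeA c1.toNat with
    | some value1 =>
      if idx + 1 < (cs.length : Int) then
        match PySem.List.pyGet? cs (idx + 1) with   -- name[idx+1]; in range, so pyGet? is some
        | some c2 =>
          match utf2mimeA c2.toNat with
          | some value2 => Char.ofNat (0x3800 + (value2 <<< 6) + value1).toNat :: loopA cs rest.tail
          | none => Char.ofNat (0x4800 + value1).toNat :: loopA cs rest
        | none => Char.ofNat (0x4800 + value1).toNat :: loopA cs rest  -- unreachable (idx+1 < len)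
      else Char.ofNat (0x4800 + value1).toNat :: loopA cs rest
    | none => c1 :: loopA cs rest
termination_by l => l.length
decreasing_by all_goals (simp [List.length_tail]; try omega)

def encode_streamname_unicode (name : String) (isTable : Bool) : String :=
  let cs := name.toList
  let out : List Char := if isTable then [Char.ofNat 0x4840] else []
  String.mk (out ++ loopA cs (PySem.List.enumerate cs))

-- ===== PORT B =====
def pvCharset : List Char := "0123456789ABCDEFGHIJKLMNOPQRSTUVWXYZabcdefghijklmnopqrstuvwxyz._".toList

-- _MIME = {c: i for i, c in enumerate(charset)}
def pvMime : PySem.Dict Char Int :=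
  (PySem.List.enumerate pvCharset).foldl (fun d p => d.insert p.2 p.1) PySem.Dict.empty

-- the inner chunking loop over a run's value list: pairs, plus the odd leftover
def encRunB : List Int → List Char
  | v1 :: v2 :: vs => Char.ofNat (0x3800 + (v2 <<< 6) + v1).toNat :: encRunB vs
  | [v1] => [Char.ofNat (0x4800 + v1).toNat]
  | [] => []

-- the outer while loop: peel off one maximal run of equal encodability, encode it
def stageB (cs : List Char) : List Char :=
  match cs with
  | [] => []
  | c :: t =>
    let enc := pvMime.contains c
    let run := (c :: t).takeWhile (fun d => pvMime.contains d == enc)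
    let rest := (c :: t).dropWhile (fun d => pvMime.contains d == enc)
    (if enc then encRunB (run.map (fun d => pvMime.getD d 0)) else run) ++ stageB rest
termination_by cs.length
decreasing_by
  simp only [List.dropWhile_cons, beq_self_eq_true, if_true]
  have := List.length_dropWhile_le (fun d => pvMime.contains d == pvMime.contains c) t
  simp; omega

def encode_streamname_unicode_alt (name : String) (isTable : Bool) : String :=
  String.mk ((if isTable then [Char.ofNat 0x4840] else []) ++ stageB name.toList)

-- ===== PRECONDITION & SPEC =====
def Spec_encode_streamname_unicode (name : String) (isTable : Bool) (out : String) : Prop := out = encode_streamname_unicode_alt name isTable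
instance (name : String) (isTable : Bool) (out : String) : Decidable (Spec_encode_streamname_unicode name isTable out) := by unfold Spec_encode_streamname_unicode; infer_instance

-- ===== CLAIM (what is proved, stated in full; the proofs are below) =====
def Claim_equal_encode_streamname_unicode : Prop := ∀ (name : String) (isTable : Bool), Dom_encode_streamname_unicode name isTable → Spec_encode_streamname_unicode name isTable (encode_streamname_unicode name isTable)

-- ===== LEMMAS AND PROOFS =====

-- greedy one-pass pairing: the common reference both ports are reduced to
def greedyH : List Char → List Char
  | [] => []
  | [c1] => if pvMime.contains c1 then [Char.ofNat (0x4800 + pvMime.getD c1 0).toNat] else [c1]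
  | c1 :: c2 :: rest =>
    if pvMime.contains c1 then
      if pvMime.contains c2 then
        Char.ofNat (0x3800 + (pvMime.getD c2 0 <<< 6) + pvMime.getD c1 0).toNat :: greedyH rest
      else Char.ofNat (0x4800 + pvMime.getD c1 0).toNat :: greedyH (c2 :: rest)
    else c1 :: greedyH (c2 :: rest)

set_option maxRecDepth 100000 in
lemma mime_agree_ofNat : ∀ n < 127, pvMime.get? (Char.ofNat n) = utf2mimeA n := by decide

lemma mime_agree (c : Char) (h : pvDomChar c = true) :
    pvMime.get? c = utf2mimeA c.toNat := by
  have hlt : c.toNat < 127 := by simp [pvDomChar] at h; omega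
  have := mime_agree_ofNat c.toNat hlt
  rwa [Char.ofNat_toNat] at this

lemma contains_agree (c : Char) (h : pvDomChar c = true) :
    pvMime.contains c = (utf2mimeA c.toNat).isSome := by
  rcases hv : utf2mimeA c.toNat with _ | v
  · have := (PySem.Dict.get?_eq_none_iff_contains pvMime c).mp (by rw [mime_agree c h, hv])
    simp [this]
  · have : pvMime.get? c = some v := by rw [mime_agree c h, hv]
    by_contra hc
    rw [(PySem.Dict.get?_eq_none_iff_contains pvMime c).mpr (by simpa using hc)] at this
    simp at this

lemma getD_agree (c : Char) (h : pvDomChar c = true) (v : Int)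
    (hv : utf2mimeA c.toNat = some v) : pvMime.getD c 0 = v := by
  rw [PySem.Dict.getD_eq_get?_getD, mime_agree c h, hv]; rfl

-- ===== A = greedy =====
lemma loop_eq (cs : List Char) (hdom : cs.all pvDomChar = true) :
    ∀ n k, cs.length - k ≤ n →
      loopA cs (PySem.List.enumerate (cs.drop k) (k : Int)) = greedyH (cs.drop k) := by
  intro n
  induction n with
  | zero =>
    intro k hk
    have h : cs.drop k = [] := by
      apply List.eq_nil_of_length_eq_zero; simp; omega
    simp [h, loopA, greedyH]
  | succ n ih =>
    intro k hk
    rcases h : cs.drop k with _ | ⟨c1, rest⟩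
    · simp [loopA, greedyH]
    · have hk1 : k < cs.length := by
        have := congrArg List.length h; simp at this; omega
      have hdrop1 : cs.drop (k + 1) = rest := by
        have := congrArg (List.drop 1) h
        simpa [List.drop_drop, Nat.add_comm] using this
      have hc1 : pvDomChar c1 = true := by
        have hmem : c1 ∈ cs := by
          have : c1 ∈ cs.drop k := by rw [h]; exact List.mem_cons_self
          exact List.mem_of_mem_drop this
        exact (List.all_eq_true.mp hdom) c1 hmem
      have hcast1 : ((k : Int) + 1) = ((k + 1 : Nat) : Int) := by norm_cast
      rw [PySem.List.enumerate_cons]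
      rcases hu1 : utf2mimeA c1.toNat with _ | v1
      · -- not encodable: emit c1 and advance by 1
        have hcont1 : pvMime.contains c1 = false := by
          rw [contains_agree c1 hc1, hu1]; rfl
        have hrec := ih (k + 1) (by omega)
        rw [hdrop1] at hrec
        rcases rest with _ | ⟨c2, rest2⟩
        · simp [loopA, hu1, greedyH, hcont1]
        · simp only [loopA, hu1, greedyH, hcont1, Bool.false_eq_true, if_false]
          norm_num
          rw [hcast1]
          rw [PySem.List.enumerate_cons] at hrec
          exact hrec
      · have hcont1 : pvMime.contains c1 = true := by
          rw [contains_agree c1 hc1, hu1]; rfl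
        have hgd1 : pvMime.getD c1 0 = v1 := getD_agree c1 hc1 v1 hu1
        rcases rest with _ | ⟨c2, rest2⟩
        · -- last character, single-encode
          have hlen : cs.length = k + 1 := by
            have := congrArg List.length hdrop1; simp at this; omega
          have hcond : ¬ ((k : Int) + 1 < (cs.length : Int)) := by
            rw [hlen]; push_cast; omega
          simp [loopA, hu1, hcond, greedyH, hcont1, hgd1]
        · have hlt : k + 1 < cs.length := by
            have := congrArg List.length hdrop1; simp at this; omega
          have hcond : ((k : Int) + 1 < (cs.length : Int)) := by push_cast; omega
          have hget : PySem.List.pyGet? cs ((k : Int) + 1) = some c2 := by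
            rw [hcast1, PySem.List.pyGet?_natCast]
            have h1 : (cs.drop (k + 1))[0]? = some c2 := by rw [hdrop1]; rfl
            rw [List.getElem?_drop] at h1
            simpa using h1
          have hc2 : pvDomChar c2 = true := by
            have hmem : c2 ∈ cs := by
              have : c2 ∈ cs.drop (k + 1) := by rw [hdrop1]; exact List.mem_cons_self
              exact List.mem_of_mem_drop this
            exact (List.all_eq_true.mp hdom) c2 hmem
          have hdrop2 : cs.drop (k + 2) = rest2 := by
            have h2 := congrArg (List.drop 1) hdrop1
            rw [List.drop_drop] at h2
            simpa [show 1 + (k + 1) = k + 2 by omega] using h2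
          rcases hu2 : utf2mimeA c2.toNat with _ | v2
          · -- second char not encodable: single-encode c1, advance by 1
            have hcont2 : pvMime.contains c2 = false := by
              rw [contains_agree c2 hc2, hu2]; rfl
            have hrec := ih (k + 1) (by omega)
            rw [hdrop1] at hrec
            simp only [loopA, hu1, hcond, if_true, hget, hu2, greedyH, hcont1, hcont2,
              Bool.false_eq_true, if_false, if_true]
            norm_num [hgd1]
            rw [hcast1]
            rw [PySem.List.enumerate_cons] at hrec
            exact hrec
          · -- pair-encode c1,c2: the next() skip / advance by 2
            have hcont2 : pvMime.contains c2 = true := by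
              rw [contains_agree c2 hc2, hu2]; rfl
            have hgd2 : pvMime.getD c2 0 = v2 := getD_agree c2 hc2 v2 hu2
            have hrec := ih (k + 2) (by omega)
            rw [hdrop2] at hrec
            simp only [loopA, hu1, hcond, if_true, hget, hu2, greedyH, hcont1, hcont2]
            norm_num [hgd1, hgd2]
            have : ((k : Int) + 1 + 1) = ((k + 2 : Nat) : Int) := by push_cast; ring
            rw [this]
            exact hrec

-- ===== B = greedy =====
lemma stageB_nil : stageB [] = [] := by rw [stageB.eq_def]

lemma stageB_cons_enc (c : Char) (t : List Char) (hc : pvMime.contains c = true) :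
    stageB (c :: t) =
      encRunB (((c :: t).takeWhile (fun d => pvMime.contains d)).map (fun d => pvMime.getD d 0)) ++
        stageB ((c :: t).dropWhile (fun d => pvMime.contains d)) := by
  rw [stageB.eq_def]
  simp [hc]

lemma stageB_cons_nonenc (c : Char) (t : List Char) (hc : pvMime.contains c = false) :
    stageB (c :: t) =
      (c :: t).takeWhile (fun d => pvMime.contains d == false) ++
        stageB ((c :: t).dropWhile (fun d => pvMime.contains d == false)) := by
  rw [stageB.eq_def]
  simp [hc]

lemma stage_split_enc (cs : List Char) :
    encRunB ((cs.takeWhile (fun d => pvMime.contains d)).map (fun d => pvMime.getD d 0)) ++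
      stageB (cs.dropWhile (fun d => pvMime.contains d)) = stageB cs := by
  rcases cs with _ | ⟨c, t⟩
  · simp [stageB_nil, encRunB]
  · rcases hc : pvMime.contains c with _ | _
    · simp [hc, encRunB]
    · rw [stageB_cons_enc c t hc]

lemma stage_split_nonenc (cs : List Char) :
    cs.takeWhile (fun d => pvMime.contains d == false) ++
      stageB (cs.dropWhile (fun d => pvMime.contains d == false)) = stageB cs := by
  rcases cs with _ | ⟨c, t⟩
  · simp [stageB_nil]
  · rcases hc : pvMime.contains c with _ | _
    · rw [stageB_cons_nonenc c t hc]
    · simp [hc]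

lemma stage_eq_greedy : ∀ cs : List Char, stageB cs = greedyH cs := by
  intro cs
  induction cs using greedyH.induct with
  | case1 => simp [stageB_nil, greedyH]
  | case2 c1 hc1 =>
    rw [stageB_cons_enc c1 [] hc1]
    simp [greedyH, hc1, encRunB, stageB_nil]
  | case3 c1 hc1 =>
    have hc1' : pvMime.contains c1 = false := by simpa using hc1
    rw [stageB_cons_nonenc c1 [] hc1']
    simp [greedyH, hc1', stageB_nil]
  | case4 c1 c2 rest hc1 hc2 ih =>
    rw [stageB_cons_enc c1 (c2 :: rest) hc1]
    simp only [List.takeWhile_cons, List.dropWhile_cons, hc1, hc2, if_true, List.map_cons]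
    rw [encRunB]
    simp only [List.cons_append]
    rw [stage_split_enc rest, ih, greedyH]
    simp [hc1, hc2]
  | case5 c1 c2 rest hc1 hc2 ih =>
    have hc2' : pvMime.contains c2 = false := by simpa using hc2
    rw [stageB_cons_enc c1 (c2 :: rest) hc1]
    simp only [List.takeWhile_cons, List.dropWhile_cons, hc1, hc2', if_true,
      Bool.false_eq_true, if_false, List.map_cons, List.map_nil]
    rw [encRunB]
    simp only [List.cons_append, List.nil_append]
    rw [ih, greedyH]
    simp [hc1, hc2']
  | case6 c1 c2 rest hc1 ih =>
    have hc1' : pvMime.contains c1 = false := by simpa using hc1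
    rw [stageB_cons_nonenc c1 (c2 :: rest) hc1']
    rw [List.takeWhile_cons_of_pos (by simp [hc1']), List.dropWhile_cons_of_pos (by simp [hc1'])]
    simp only [List.cons_append]
    rw [stage_split_nonenc (c2 :: rest), ih, greedyH]
    simp [hc1']

-- ===== VERDICT (by name: the statement is the Claim_ definition above) =====
theorem encode_streamname_unicode_spec : Claim_equal_encode_streamname_unicode := by
  intro name isTable hdom
  unfold Spec_encode_streamname_unicode encode_streamname_unicode encode_streamname_unicode_alt
  have h := loop_eq name.toList hdom name.toList.length 0 (by omega)
  simp only [List.drop_zero] at h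
  rw [stage_eq_greedy]
  simpa using congrArg (fun l => String.mk ((if isTable then [Char.ofNat 0x4840] else []) ++ l)) h
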